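-- pv_equiv track=rewrite | github.com/JoJoJacKy/datastructures | Chapter20TechniquesCodeOptimiation.py | group_array
-- ===== SOURCE A (Python) =====
-- def group_array(array):
--     hash_table = {}
--     new_array = []
--
--     # Store the tallies of each string within the hash table
--     for value in array:
--         if hash_table.get(value): # Check if the value exists within the hash table
--             hash_table[value] += 1 # If it does, tally up the key
--         else:
--             hash_table[value] = 1 # If not, add the key to the hash table
--
--     # Now iterate over the hash table and populate a new array with the currect number of each string
--     for key, count in hash_table.items(): # Iterate over all the items (Key-Value Pairs) of the hash table
--         for i in range(count):
--             new_array.append(key)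
--
--     return new_array
-- ===== SOURCE B (Python) =====
-- def group_array(array):
--     result = []
--     work = array
--     while work:
--         x = work[0]
--         result += [v for v in work if v == x]
--         work = [v for v in work if v != x]
--     return result
-- ===== Notes on version B (the rewrite author's own statement) =====
-- stated objective: alternative
-- what changed: Replaced the two-phase hash-table tally (build a counter dict, then expand its items) by repeated partition extraction: while elements remain, split off every occurrence of the first remaining value as one finished group and continue on the rest, with no counter or seen structure at all.
import Mathlib
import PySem

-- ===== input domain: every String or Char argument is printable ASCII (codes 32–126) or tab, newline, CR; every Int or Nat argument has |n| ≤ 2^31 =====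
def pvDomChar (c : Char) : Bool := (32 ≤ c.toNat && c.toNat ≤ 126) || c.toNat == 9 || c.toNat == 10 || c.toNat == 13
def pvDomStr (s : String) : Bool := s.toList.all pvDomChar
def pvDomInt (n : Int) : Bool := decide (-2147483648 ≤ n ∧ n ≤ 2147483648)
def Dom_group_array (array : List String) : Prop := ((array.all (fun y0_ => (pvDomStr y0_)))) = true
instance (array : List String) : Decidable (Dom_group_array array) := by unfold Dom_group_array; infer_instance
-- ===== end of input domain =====

-- B replaces A's two-phase counter-dict grouping by iterative partition extraction (split off the first value's whole group, repeat on the rest); alternative algorithm, not faster.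


-- ===== PORT A =====
def group_array (array : List String) : List String :=
  let hash_table : PySem.Dict String Int :=
    array.foldl (fun d value =>
      match d.get? value with              -- hash_table.get(value): truthy ↔ some nonzero
      | some c => if c ≠ 0 then d.insert value (c + 1) else d.insert value 1
      | none => d.insert value 1) PySem.Dict.empty
  hash_table.items.foldl (fun new_array kc =>
    (PySem.List.pyRange 0 kc.2 1).foldl (fun a _ => a ++ [kc.1]) new_array) []

-- ===== PORT B =====
-- the while loop of Source B: result accumulator, shrinking work list
def groupLoop (result work : List String) : List String :=
  match work with
  | [] => result
  | x :: t =>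
      groupLoop (result ++ (x :: t).filter (fun v => v == x))
                ((x :: t).filter (fun v => !(v == x)))
termination_by work.length
decreasing_by
  simp only [List.filter_cons, beq_self_eq_true, Bool.not_true, Bool.false_eq_true,
             if_false, List.length_cons]
  exact Nat.lt_succ_of_le (List.length_filter_le _ _)

def group_array_alt (array : List String) : List String :=
  groupLoop [] array

-- ===== PRECONDITION & SPEC =====
def Spec_group_array (array : List String) (out : List String) : Prop := out = group_array_alt array
instance (array : List String) (out : List String) : Decidable (Spec_group_array array out) := by unfold Spec_group_array; infer_instance

-- ===== CLAIM (what is proved, stated in full; the proofs are below) =====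
def Claim_equal_group_array : Prop := ∀ (array : List String), Dom_group_array array → Spec_group_array array (group_array array)

-- ===== LEMMAS AND PROOFS =====

-- A's truthiness-guarded tally step is exactly the getD-based counter step.
theorem aStep_eq :
    (fun (d : PySem.Dict String Int) (value : String) =>
      match d.get? value with
      | some c => if c ≠ 0 then d.insert value (c + 1) else d.insert value 1
      | none => d.insert value 1)
    = (fun (d : PySem.Dict String Int) (value : String) => d.insert value (d.getD value 0 + 1)) := by
  funext d value
  rw [PySem.Dict.getD_eq_get?_getD]
  cases h : d.get? value with
  | none => simp
  | some c =>
    by_cases hc : c = 0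
    · subst hc; simp
    · simp [hc]

-- A's expansion loop over the counter's items is the flatMap of replicates.
theorem group_array_eq_flatMap (array : List String) :
    group_array array
      = (PySem.Set.ofList array).flatMap (fun k => List.replicate (array.count k) k) := by
  unfold group_array
  rw [aStep_eq, PySem.Dict.foldl_insert_getD_add_one_eq_counter]
  have hinner : (fun (a : List String) (kc : String × Int) =>
      (PySem.List.pyRange 0 kc.2 1).foldl (fun a _ => a ++ [kc.1]) a)
      = (fun (a : List String) (kc : String × Int) => a ++ List.replicate kc.2.toNat kc.1) := by
    funext a kc
    rw [PySem.List.foldl_append_singleton_eq_map (fun _ => kc.1), List.map_const',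
        PySem.List.length_pyRange_one]
    simp
  rw [hinner, PySem.List.foldl_append_eq_flatMap, PySem.Dict.items_counter]
  simp [List.flatMap_map, List.count]

-- Building a set from l or from l with the already-present x filtered out is the same.
theorem foldl_add_filter (x : String) :
    ∀ (l s : List String), x ∈ s →
      l.foldl PySem.Set.add s = (l.filter (fun y => !(y == x))).foldl PySem.Set.add s := by
  intro l
  induction l with
  | nil => intro s _; rfl
  | cons y t ih =>
    intro s hx
    rw [List.filter_cons]
    by_cases hyx : y = x
    · subst hyx
      simp only [beq_self_eq_true, Bool.not_true, Bool.false_eq_true, if_false,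
                 List.foldl_cons, PySem.Set.add_of_mem hx]
      exact ih s hx
    · have : (!(y == x)) = true := by simp [hyx]
      rw [if_pos this, List.foldl_cons, List.foldl_cons]
      apply ih
      by_cases hys : y ∈ s
      · rwa [PySem.Set.add_of_mem hys]
      · rw [PySem.Set.add_of_not_mem hys]; exact List.mem_append_left _ hx

-- A leading already-finished element x passes unchanged through set-building over l avoiding x.
theorem foldl_add_cons (x : String) :
    ∀ (l s : List String), (∀ y ∈ l, y ≠ x) →
      l.foldl PySem.Set.add (x :: s) = x :: l.foldl PySem.Set.add s := by
  intro l
  induction l with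
  | nil => intro s _; rfl
  | cons y t ih =>
    intro s h
    have hyx : y ≠ x := h y (List.mem_cons_self)
    have hrest : ∀ z ∈ t, z ≠ x := fun z hz => h z (List.mem_cons_of_mem _ hz)
    rw [List.foldl_cons, List.foldl_cons]
    by_cases hys : y ∈ s
    · rw [PySem.Set.add_of_mem hys, PySem.Set.add_of_mem (List.mem_cons_of_mem _ hys)]
      exact ih s hrest
    · have : y ∉ x :: s := by simp [hyx, hys]
      rw [PySem.Set.add_of_not_mem hys, PySem.Set.add_of_not_mem this]
      simpa using ih (s ++ [y]) hrest

-- set(x::t) = x followed by set(t with x removed)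
theorem ofList_cons_filter (x : String) (t : List String) :
    PySem.Set.ofList (x :: t)
      = x :: PySem.Set.ofList (t.filter (fun y => !(y == x))) := by
  rw [PySem.Set.ofList_eq_foldl, PySem.Set.ofList_eq_foldl, List.foldl_cons,
      PySem.Set.add_of_not_mem (List.not_mem_nil), List.nil_append]
  rw [foldl_add_filter x t [x] (List.mem_singleton.mpr rfl)]
  exact foldl_add_cons x _ [] (fun y hy => by
    have := (List.mem_filter.mp hy).2
    simpa using this)

-- B's loop invariant: groupLoop appends, group by group, the groups of work.
theorem groupLoop_eq :
    ∀ (result work : List String),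
      groupLoop result work
        = result ++ (PySem.Set.ofList work).flatMap
            (fun k => List.replicate (work.count k) k) := by
  intro result work
  induction result, work using groupLoop.induct with
  | case1 result => simp [groupLoop]
  | case2 result x t ih =>
    rw [groupLoop, ih]
    have hxt : (x :: t).filter (fun v => !(v == x)) = t.filter (fun v => !(v == x)) := by
      simp
    rw [hxt, ofList_cons_filter, List.flatMap_cons, ← List.filter_beq (l := x :: t) x]
    have hcnt : ∀ k ∈ PySem.Set.ofList (t.filter (fun y => !(y == x))),
        List.replicate ((x :: t).count k) k
          = List.replicate ((t.filter (fun v => !(v == x))).count k) k := by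
      intro k hk
      rw [← PySem.List.dedup_eq_ofList] at hk
      have hk' : k ∈ t.filter (fun y => !(y == x)) := by simpa [pysem] using hk
      have hkx : k ≠ x := by simpa using (List.mem_filter.mp hk').2
      have hcount : List.count k (x :: t) = List.count k (t.filter (fun v => !(v == x))) := by
        rw [List.count_filter (by simpa using hkx)]
        simp [Ne.symm hkx]
      rw [hcount]
    have hflat :
        List.flatMap (fun k => List.replicate ((x :: t).count k) k)
            (PySem.Set.ofList (t.filter (fun y => !(y == x))))
          = List.flatMap (fun k => List.replicate ((t.filter (fun v => !(v == x))).count k) k)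
            (PySem.Set.ofList (t.filter (fun y => !(y == x)))) := by
      rw [List.flatMap_def, List.flatMap_def, List.map_congr_left hcnt]
    rw [hflat]
    simp [List.append_assoc]

-- ===== VERDICT (by name: the statement is the Claim_ definition above) =====
theorem group_array_spec : Claim_equal_group_array := by
  intro array _
  unfold Spec_group_array
  rw [group_array_eq_flatMap]
  unfold group_array_alt
  rw [groupLoop_eq [] array]
  simp
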